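-- pv_equiv track=rewrite | github.com/Lee0701/l10n-tools | relative_search.py | search_multiple_pattern_tables
-- ===== SOURCE A (Python) =====
-- def search_multiple_pattern_tables(search_str, pattern_tables, data):
--     results = {}
--
--     for table_name, pattern_table in pattern_tables.items():
--         offset, search_results = search_pattern_table(search_str, pattern_table, data)
--
--         if offset is None:
--             continue
--
--         for result in search_results:
--             result_offset, result_addr = result
--             # 찾은 文字列과 周邊 텍스트를 表示할때 使用할 테이블別 오프셋을 求한다.
--             display_offset = result_offset - offset
--             # 찾아진 住所別로 그룹化
--             if result_addr not in results:
--                 results[result_addr] = []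
--             results[result_addr].append((table_name, display_offset))
--
--     results = sorted(results.items(), key=lambda x: len(x[1]), reverse=False)
--     return results
--
-- def search_pattern_table(search_str, pattern_table, data):
--     # 檢索할 文字列의 인덱스들을 첫 文字에 對한 差異들의 패턴으로 表現한다.
--     # None 값은 Don't care로 處理. 但, 有效한 글字가 두글字 未滿이면 檢索에서 除外한다.
--     pattern = [pattern_table.index(c) if c in pattern_table else None for c in search_str]
--     filtered = [d for d in pattern if d is not None]
--     offset = filtered[0] if len(filtered) > 0 else None
--     pattern = [d - offset if d is not None else None for d in pattern]
--     if len([c for c in pattern if c is not None]) <= 1: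
--         pattern = []
--
--     # 만들어진 패턴으로 檢索을 實行한다.
--     return offset, search_pattern(data, pattern)
--
-- def search_pattern(data, pattern):
--     found = []
--     pattern_len = len(pattern)
--     if pattern.count(None) == pattern_len:
--         return found
--     first_not_none = [i for i, d in enumerate(pattern) if d is not None][0]
--     for index in range(len(data) - pattern_len):
--         # 檢索할 패턴의 길이만큼 자른다.
--         sliced_data = data[index : index+pattern_len]
--         offset = sliced_data[first_not_none]
--         # 잘라낸 部分을 그 첫 글字에 對한 오프셋들로 變換.
--         data_pattern = [d - offset for d in sliced_data]
--         data_pattern = [None if pattern[i] is None else data_pattern[i] for i in range(pattern_len)]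
--         # 두 값이 一致하면 檢索結果에 包含.
--         if data_pattern == pattern:
--             found.append((offset, index))
--     return found
-- ===== SOURCE B (Python) =====
-- def search_multiple_pattern_tables(search_str, pattern_tables, data):
--     # Alternative algorithm: instead of A's window-by-window slice/rebuild/compare of a
--     # full offset pattern, B transposes the loops: per table it prunes a candidate-start
--     # set one CHAINED consecutive-difference constraint at a time (set-filtering, one
--     # pass over the surviving candidates per constraint); correctness: the anchored
--     # offset pattern matches iff every consecutive pair of non-don't-care positions has
--     # the right difference (telescoping). Matches are then grouped by first-occurrence
--     # address and stable-sorted by group size.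
--     n, m = len(data), len(search_str)
--     entries = []
--     for table_name, pattern_table in pattern_tables.items():
--         keys = [(j, pattern_table.index(c))
--                 for j, c in enumerate(search_str) if c in pattern_table]
--         if len(keys) < 2:
--             continue
--         f, base = keys[0]
--         cands = list(range(n - m))
--         pj, pp = keys[0]
--         for j, p in keys[1:]:
--             cands = [i for i in cands if data[i + j] - data[i + pj] == p - pp]
--             pj, pp = j, p
--         entries.extend((i, (table_name, data[i + f] - base)) for i in cands)
--     grouped = [(addr, [item for a, item in entries if a == addr])
--                for addr in dict.fromkeys(a for a, _ in entries)]
--     grouped.sort(key=lambda g: len(g[1]))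
--     return grouped
-- ===== Notes on version B (the rewrite author's own statement) =====
-- stated objective: alternative
-- what changed: B transposes the loops: instead of A's window-by-window slicing and rebuilding of a full offset pattern, it prunes a candidate-start set one chained consecutive-difference constraint at a time (constraint-outer set filtering, justified by telescoping of offsets), and groups the flat match list by first-occurrence address instead of A's incremental dict-append.
import Mathlib
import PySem

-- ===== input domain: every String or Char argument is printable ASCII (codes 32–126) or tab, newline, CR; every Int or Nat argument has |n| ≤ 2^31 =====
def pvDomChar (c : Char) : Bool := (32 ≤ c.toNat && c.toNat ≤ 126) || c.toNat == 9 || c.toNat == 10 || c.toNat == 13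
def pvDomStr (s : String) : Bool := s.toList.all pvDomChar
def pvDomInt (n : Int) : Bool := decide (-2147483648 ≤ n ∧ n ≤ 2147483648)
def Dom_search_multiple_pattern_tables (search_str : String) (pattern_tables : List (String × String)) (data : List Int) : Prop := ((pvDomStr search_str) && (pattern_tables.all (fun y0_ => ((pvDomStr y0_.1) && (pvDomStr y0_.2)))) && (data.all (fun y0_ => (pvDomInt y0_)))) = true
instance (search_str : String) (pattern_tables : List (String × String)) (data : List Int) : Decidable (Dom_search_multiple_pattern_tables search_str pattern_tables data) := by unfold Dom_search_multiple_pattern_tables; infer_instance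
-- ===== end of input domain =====

-- B transposes A's loops: instead of a window-by-window slice/rebuild/compare of a full
-- offset pattern it prunes a candidate-start set one chained consecutive-difference
-- constraint at a time, and groups the flat match list by first-occurrence address
-- (objective: alternative algorithm, same asymptotic cost).

-- ===== PORT A =====

-- port of helper search_pattern
def pvA_search_pattern (data : List Int) (pattern : List (Option Int)) : List (Int × Int) :=
  let pattern_len := pattern.length
  if PySem.List.count pattern none = pattern_len then []
  else
    -- '[i for i, d in enumerate(pattern) if d is not None][0]' — the guard above makes it non-empty
    let first_not_none :=
      (((PySem.List.enumerate pattern).filter (fun p => p.2.isSome)).headD (0, none)).1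
    (PySem.List.pyRange 0 ((data.length : Int) - (pattern_len : Int)) 1).foldl
      (fun found index =>
        let sliced_data := PySem.List.slice data (some index) (some (index + (pattern_len : Int)))
        -- 'sliced_data[first_not_none]' — index provably in range inside this loop
        let offset := PySem.List.pyGetD sliced_data first_not_none 0
        let data_pattern := sliced_data.map (fun d => d - offset)
        -- '[None if pattern[i] is None else data_pattern[i] for i in range(pattern_len)]'
        -- (indices 0 .. pattern_len-1 are in range for both lists inside this loop)
        let data_pattern2 := (List.range pattern_len).map
          (fun i => if pattern.getD i none = none then none else some (data_pattern.getD i 0))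
        if data_pattern2 = pattern then found ++ [(offset, index)] else found)
      []

-- port of helper search_pattern_table
def pvA_search_pattern_table (search_str pattern_table : String) (data : List Int) :
    Option Int × List (Int × Int) :=
  -- 'pattern_table.index(c) if c in pattern_table else None' (single-char membership/index)
  let pattern : List (Option Int) := search_str.toList.map (fun c =>
    match PySem.List.index? pattern_table.toList c with
    | some k => some (k : Int)
    | none => none)
  let filtered := pattern.filterMap id
  -- 'filtered[0] if len(filtered) > 0 else None'
  let offset : Option Int := if 0 < filtered.length then some (filtered.headD 0) else none
  -- 'd - offset if d is not None else None' — the subtraction is only reached when offset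
  -- is not None (otherwise pattern is all None), so the .getD 0 value is never used
  let offv := offset.getD 0
  let pattern2 := pattern.map (fun d => d.map (fun v => v - offv))
  let pattern3 := if (pattern2.filterMap id).length ≤ 1 then ([] : List (Option Int)) else pattern2
  (offset, pvA_search_pattern data pattern3)

def search_multiple_pattern_tables (search_str : String) (pattern_tables : List (String × String)) (data : List Int) : List (Int × (List (String × Int))) :=
  let results : PySem.Dict Int (List (String × Int)) :=
    (PySem.Dict.ofList pattern_tables).items.foldl
      (fun results tp =>
        let res := pvA_search_pattern_table search_str tp.2 data
        match res.1 with
        | none => results  -- 'continue'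
        | some off =>
          res.2.foldl
            (fun results r =>
              let display_offset := r.1 - off
              -- 'if result_addr not in results: results[result_addr] = []' then append
              let results1 := if results.contains r.2 then results else results.insert r.2 []
              results1.insert r.2 (results1.getD r.2 [] ++ [(tp.1, display_offset)]))
            results)
      PySem.Dict.empty
  PySem.List.sorted results.items (fun x => x.2.length) false

-- ===== PORT B =====

-- matches of one pattern table, already shaped as (addr, (table_name, display_offset)):
-- a candidate-start set pruned one chained consecutive-difference constraint at a time
def pvB_tableEntries (table_name search_str pattern_table : String) (data : List Int) :
    List (Int × (String × Int)) :=
  let keys := (PySem.List.enumerate search_str.toList).filterMap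
    (fun p => (PySem.List.index? pattern_table.toList p.2).map (fun k => (p.1, (k : Int))))
  if keys.length < 2 then []
  else
    let f := (keys.headD (0, 0)).1
    let base := (keys.headD (0, 0)).2
    -- 'cands = list(range(n - m))', then 'for j, p in keys[1:]: cands = [i for i in cands if ...]'
    -- the running (pj, pp) is carried as the second state component
    let st := keys.tail.foldl
      (fun (st : List Int × (Int × Int)) q =>
        (st.1.filter (fun i =>
          PySem.List.pyGetD data (i + q.1) 0 - PySem.List.pyGetD data (i + st.2.1) 0
            == q.2 - st.2.2), q))
      (PySem.List.pyRange 0 ((data.length : Int) - (search_str.toList.length : Int)) 1,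
        keys.headD (0, 0))
    st.1.map (fun i => (i, (table_name, PySem.List.pyGetD data (i + f) 0 - base)))

def search_multiple_pattern_tables_alt (search_str : String) (pattern_tables : List (String × String)) (data : List Int) : List (Int × (List (String × Int))) :=
  let entries :=
    (PySem.Dict.ofList pattern_tables).items.foldl
      (fun acc tp => acc ++ pvB_tableEntries tp.1 search_str tp.2 data) []
  let grouped := (PySem.List.dedup (entries.map (·.1))).map
    (fun a => (a, (entries.filter (fun e => e.1 == a)).map (·.2)))
  PySem.List.sorted grouped (fun x => x.2.length) false

-- ===== PRECONDITION & SPEC =====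
def Spec_search_multiple_pattern_tables (search_str : String) (pattern_tables : List (String × String)) (data : List Int) (out : List (Int × (List (String × Int)))) : Prop := out = search_multiple_pattern_tables_alt search_str pattern_tables data
instance (search_str : String) (pattern_tables : List (String × String)) (data : List Int) (out : List (Int × (List (String × Int)))) : Decidable (Spec_search_multiple_pattern_tables search_str pattern_tables data out) := by unfold Spec_search_multiple_pattern_tables; infer_instance

-- ===== CLAIM (what is proved, stated in full; the proofs are below) =====
def Claim_equal_search_multiple_pattern_tables : Prop := ∀ (search_str : String) (pattern_tables : List (String × String)) (data : List Int), Dom_search_multiple_pattern_tables search_str pattern_tables data → Spec_search_multiple_pattern_tables search_str pattern_tables data (search_multiple_pattern_tables search_str pattern_tables data)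

-- ===== LEMMAS AND PROOFS =====

-- keysOf xs s0: the (index, value) pairs of the non-None entries of xs, indices from s0
def pvKeysOf (xs : List (Option Int)) (s0 : Int) : List (Int × Int) :=
  (PySem.List.enumerate xs s0).filterMap (fun p => p.2.map (fun k => (p.1, k)))

theorem pvKeysOf_nil (s0 : Int) : pvKeysOf [] s0 = [] := rfl

theorem pvKeysOf_cons (x : Option Int) (xs : List (Option Int)) (s0 : Int) :
    pvKeysOf (x :: xs) s0 =
      (match x with | some k => [(s0, k)] | none => []) ++ pvKeysOf xs (s0 + 1) := by
  cases x <;> simp [pvKeysOf, PySem.List.enumerate_cons]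

-- B's key list is pvKeysOf of A's pattern list
theorem pvKeys_eq_keysOf (cs : List Char) (h : Char → Option Int) (s0 : Int) :
    (PySem.List.enumerate cs s0).filterMap (fun p => (h p.2).map (fun k => (p.1, k)))
      = pvKeysOf (cs.map h) s0 := by
  induction cs generalizing s0 with
  | nil => rfl
  | cons c cs ih =>
    simp only [List.map_cons, pvKeysOf_cons, PySem.List.enumerate_cons, List.filterMap_cons]
    cases h c <;> simp [ih, pvKeysOf]

-- the second components of the keys are the filtered pattern
theorem pvKeysOf_map_snd (xs : List (Option Int)) (s0 : Int) :
    (pvKeysOf xs s0).map (·.2) = xs.filterMap id := by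
  induction xs generalizing s0 with
  | nil => rfl
  | cons x xs ih => cases x <;> simp [pvKeysOf_cons, ih]

-- keysOf of a mapped pattern
theorem pvKeysOf_map (g : Int → Int) (xs : List (Option Int)) (s0 : Int) :
    pvKeysOf (xs.map (Option.map g)) s0 = (pvKeysOf xs s0).map (fun p => (p.1, g p.2)) := by
  induction xs generalizing s0 with
  | nil => rfl
  | cons x xs ih => cases x <;> simp [pvKeysOf_cons, ih]

-- keysOf as a map over the filtered enumeration (links A's first_not_none to B's f)
theorem pvKeysOf_eq_filter_map (xs : List (Option Int)) (s0 : Int) :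
    pvKeysOf xs s0 =
      ((PySem.List.enumerate xs s0).filter (fun p => p.2.isSome)).map
        (fun p => (p.1, p.2.getD 0)) := by
  induction xs generalizing s0 with
  | nil => rfl
  | cons x xs ih => cases x <;> simp [pvKeysOf_cons, PySem.List.enumerate_cons, ih]

-- membership characterisation of keysOf
theorem pvMem_keysOf_gen (xs : List (Option Int)) (s0 j q : Int) :
    (j, q) ∈ pvKeysOf xs s0 ↔
      ∃ jn : Nat, jn < xs.length ∧ j = s0 + jn ∧ xs[jn]? = some (some q) := by
  induction xs generalizing s0 with
  | nil => simp [pvKeysOf_nil]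
  | cons x xs ih =>
    cases x with
    | none =>
      simp only [pvKeysOf_cons, List.nil_append, ih, List.length_cons]
      constructor
      · rintro ⟨jn, h1, h2, h3⟩
        refine ⟨jn + 1, by omega, by push_cast; omega, by simpa using h3⟩
      · rintro ⟨jn, h1, h2, h3⟩
        cases jn with
        | zero => simp at h3
        | succ k =>
          refine ⟨k, by omega, by push_cast at h2 ⊢; omega, by simpa using h3⟩
    | some v =>
      simp only [pvKeysOf_cons, List.cons_append, List.nil_append, List.mem_cons, ih,
        List.length_cons, Prod.mk.injEq]
      constructor
      · rintro (⟨hj, hq⟩ | ⟨jn, h1, h2, h3⟩)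
        · exact ⟨0, by omega, by simp [hj], by simp [hq]⟩
        · exact ⟨jn + 1, by omega, by push_cast; omega, by simpa using h3⟩
      · rintro ⟨jn, h1, h2, h3⟩
        cases jn with
        | zero =>
          left
          simp only [List.getElem?_cons_zero, Option.some.injEq] at h3
          exact ⟨by omega, h3.symm⟩
        | succ k =>
          right
          refine ⟨k, by omega, by push_cast at h2 ⊢; omega, by simpa using h3⟩

theorem pvMem_keysOf (xs : List (Option Int)) (j q : Int) :
    (j, q) ∈ pvKeysOf xs 0 ↔
      ∃ jn : Nat, jn < xs.length ∧ j = (jn : Int) ∧ xs[jn]? = some (some q) := by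
  simpa using pvMem_keysOf_gen xs 0 j q

-- A's grouping step is Dict.modify
theorem pvStep_eq_modify (results : PySem.Dict Int (List (String × Int))) (k : Int)
    (x : String × Int) :
    ((if results.contains k then results else results.insert k []).insert k
      ((if results.contains k then results else results.insert k []).getD k [] ++ [x]))
    = results.modify k [] (· ++ [x]) := by
  by_cases h : results.contains k
  · simp [h, PySem.Dict.modify]
  · have hf : results.contains k = false := by simpa using h
    simp [h, PySem.Dict.modify, PySem.Dict.insert_insert_self,
      PySem.Dict.getD_of_not_contains _ _ hf]

-- a fold of per-element folds is a fold over the flattened list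
theorem pvFoldl_foldl_flatMap {α β γ : Type} (E : α → List β) (step : γ → β → γ)
    (l : List α) (init : γ) :
    l.foldl (fun d x => (E x).foldl step d) init = (l.flatMap E).foldl step init := by
  induction l generalizing init with
  | nil => rfl
  | cons x xs ih => simp [List.flatMap_cons, List.foldl_append, ih]

-- mapping over a conditional-append fold
theorem pvMap_foldl_append_if {α β γ : Type} (l : List α) (c : α → Bool) (h : α → β)
    (g : β → γ) (c' : α → Bool) (h' : α → γ)
    (hc : ∀ x ∈ l, c x = c' x) (hh : ∀ x ∈ l, g (h x) = h' x) (acc : List β) :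
    (l.foldl (fun acc x => if c x then acc ++ [h x] else acc) acc).map g
      = l.foldl (fun acc x => if c' x then acc ++ [h' x] else acc) (acc.map g) := by
  induction l generalizing acc with
  | nil => rfl
  | cons x xs ih =>
    have hcx := hc x (by simp)
    have hhx := hh x (by simp)
    simp only [List.foldl_cons]
    rw [← hcx]
    by_cases hx : c x = true
    · rw [if_pos hx, if_pos hx, ih (fun y hy => hc y (by simp [hy])) (fun y hy => hh y (by simp [hy]))]
      simp [hhx]
    · rw [if_neg hx, if_neg hx, ih (fun y hy => hc y (by simp [hy])) (fun y hy => hh y (by simp [hy]))]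

-- a conditional-append fold is a filter-then-map
theorem pvFoldl_if_eq_filterMap {α β : Type} (l : List α) (c : α → Bool) (h : α → β)
    (acc : List β) :
    l.foldl (fun acc x => if c x then acc ++ [h x] else acc) acc
      = acc ++ (l.filter c).map h := by
  induction l generalizing acc with
  | nil => simp
  | cons x xs ih => by_cases hx : c x <;> simp [hx, ih]

-- the grouping fold's items are the first-occurrence group-by
theorem pvGroup_items (entries : List (Int × (String × Int))) :
    (entries.foldl (fun d e => d.modify e.1 [] (· ++ [e.2])) PySem.Dict.empty).items
      = (PySem.List.dedup (entries.map (·.1))).map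
          (fun a => (a, (entries.filter (fun e => e.1 == a)).map (·.2))) := by
  have hkeys : (entries.foldl (fun d e => d.modify e.1 [] (· ++ [e.2])) PySem.Dict.empty).keys
      = PySem.List.dedup (entries.map (·.1)) := by
    have := PySem.Dict.keys_foldl_modify_key entries (fun e => e.1) []
      (fun _ e => fun v => v ++ [e.2]) PySem.Dict.empty
    simpa [PySem.Dict.keys_empty] using this
  have hnodup : (entries.foldl (fun d e => d.modify e.1 [] (· ++ [e.2])) PySem.Dict.empty).keys.Nodup := by
    exact PySem.Dict.nodup_keys_foldl_modify_key entries (fun e => e.1) []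
      (fun _ e => fun v => v ++ [e.2]) PySem.Dict.empty (by simp [PySem.Dict.keys_empty])
  rw [PySem.Dict.items_eq_map_keys _ hnodup [], hkeys]
  refine List.map_congr_left (fun a _ => ?_)
  have := PySem.Dict.getD_foldl_modify_append entries PySem.Dict.empty a
  simp only [PySem.Dict.getD_empty, List.nil_append] at this
  simp [this]

-- the chained consecutive-difference condition B maintains while pruning
def pvChain (data : List Int) (i : Int) : (Int × Int) → List (Int × Int) → Bool
  | _, [] => true
  | k, q :: rest =>
    (PySem.List.pyGetD data (i + q.1) 0 - PySem.List.pyGetD data (i + k.1) 0 == q.2 - k.2)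
      && pvChain data i q rest

-- B's staged pruning fold computes the filter by the chained condition
theorem pvStagedFilter (data : List Int) (rest : List (Int × Int)) (l : List Int)
    (k : Int × Int) :
    (rest.foldl (fun (st : List Int × (Int × Int)) q =>
        (st.1.filter (fun i =>
          PySem.List.pyGetD data (i + q.1) 0 - PySem.List.pyGetD data (i + st.2.1) 0
            == q.2 - st.2.2), q)) (l, k)).1
      = l.filter (fun i => pvChain data i k rest) := by
  induction rest generalizing l k with
  | nil => simp [pvChain]
  | cons q rest ih =>
    simp only [List.foldl_cons]
    rw [ih, List.filter_filter]
    refine List.filter_congr (fun i _ => ?_)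
    simp [pvChain, Bool.and_comm]

-- telescoping: the chained condition equals the anchored condition
theorem pvChain_eq_all (data : List Int) (i f base : Int) (k : Int × Int)
    (rest : List (Int × Int))
    (hk : PySem.List.pyGetD data (i + k.1) 0 - PySem.List.pyGetD data (i + f) 0 = k.2 - base) :
    pvChain data i k rest
      = rest.all (fun p =>
          PySem.List.pyGetD data (i + p.1) 0 - PySem.List.pyGetD data (i + f) 0 == p.2 - base) := by
  induction rest generalizing k with
  | nil => rfl
  | cons q rest ih =>
    simp only [pvChain, List.all_cons]
    by_cases hq : PySem.List.pyGetD data (i + q.1) 0 - PySem.List.pyGetD data (i + f) 0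
        = q.2 - base
    · have h1 : (PySem.List.pyGetD data (i + q.1) 0 - PySem.List.pyGetD data (i + k.1) 0
          == q.2 - k.2) = true := by
        simp only [beq_iff_eq]; omega
      have h2 : (PySem.List.pyGetD data (i + q.1) 0 - PySem.List.pyGetD data (i + f) 0
          == q.2 - base) = true := by
        simp only [beq_iff_eq]; omega
      rw [h1, h2, ih q hq]
    · have h1 : (PySem.List.pyGetD data (i + q.1) 0 - PySem.List.pyGetD data (i + k.1) 0
          == q.2 - k.2) = false := by
        simp only [beq_eq_false_iff_ne, ne_eq]; intro hc; exact hq (by omega)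
      have h2 : (PySem.List.pyGetD data (i + q.1) 0 - PySem.List.pyGetD data (i + f) 0
          == q.2 - base) = false := by
        simp only [beq_eq_false_iff_ne, ne_eq]; exact hq
      rw [h1, h2]
      simp

-- the per-table search loops agree: A's slice-and-compare window test equals
-- the anchored offset condition over the non-don't-care keys
theorem pvL_core (d : List Int) (patt2 : List (Option Int)) (f base : Int) (name : String)
    (hhead : (pvKeysOf patt2 0).head? = some (f, 0)) :
    (pvA_search_pattern d patt2).map (fun r => (r.2, (name, r.1 - base)))
      = (PySem.List.pyRange 0 ((d.length : Int) - (patt2.length : Int)) 1).foldl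
          (fun acc i =>
            if (pvKeysOf patt2 0).all
                (fun p => PySem.List.pyGetD d (i + p.1) 0 - PySem.List.pyGetD d (i + f) 0 == p.2)
            then acc ++ [(i, (name, PySem.List.pyGetD d (i + f) 0 - base))] else acc) [] := by
  have hfmem : (f, 0) ∈ pvKeysOf patt2 0 := List.mem_of_mem_head? (by rw [hhead]; rfl)
  obtain ⟨fn, hfn, hfeq, hfget⟩ := (pvMem_keysOf patt2 f 0).1 hfmem
  have hfgetE : patt2[fn]'hfn = some 0 := by
    have := hfget; rwa [List.getElem?_eq_getElem hfn, Option.some.injEq] at this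
  have hcount : ¬ (PySem.List.count patt2 none = patt2.length) := by
    intro hc
    rw [PySem.List.count_eq] at hc
    have hall := List.count_eq_length.mp hc
    have hmem : (some (0 : Int)) ∈ patt2 := by
      exact List.mem_of_getElem hfgetE
    have := hall _ hmem; simp at this
  have hfilt : (((PySem.List.enumerate patt2 0).filter (fun p => p.2.isSome)).headD (0, none)).1 = f := by
    have hk := pvKeysOf_eq_filter_map patt2 0
    rw [hk, List.head?_map] at hhead
    rcases hq : ((PySem.List.enumerate patt2 0).filter (fun p => p.2.isSome)).head? with _ | p0
    · rw [hq] at hhead; simp at hhead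
    · rw [hq] at hhead
      simp only [Option.map_some, Option.some.injEq] at hhead
      rw [List.headD_eq_head?_getD, hq]
      have : p0.1 = f := by
        have := congrArg Prod.fst hhead; simpa using this
      simpa using this
  simp only [pvA_search_pattern]
  rw [if_neg hcount, hfilt]
  have := pvMap_foldl_append_if
    (PySem.List.pyRange 0 ((d.length : Int) - (patt2.length : Int)) 1)
    (fun index =>
      decide ((List.range patt2.length).map
          (fun i => if patt2.getD i none = none then none
            else some ((PySem.List.slice d (some index) (some (index + (patt2.length : Int)))).map
              (fun v => v - PySem.List.pyGetD (PySem.List.slice d (some index) (some (index + (patt2.length : Int)))) f 0) |>.getD i 0))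
        = patt2))
    (fun index => (PySem.List.pyGetD (PySem.List.slice d (some index) (some (index + (patt2.length : Int)))) f 0, index))
    (fun r => (r.2, (name, r.1 - base)))
    (fun i => (pvKeysOf patt2 0).all
        (fun p => PySem.List.pyGetD d (i + p.1) 0 - PySem.List.pyGetD d (i + f) 0 == p.2))
    (fun i => (i, (name, PySem.List.pyGetD d (i + f) 0 - base)))
    ?_ ?_ []
  · simpa using this
  · -- conditions agree on every index of the loop
    intro i hi
    beta_reduce
    obtain ⟨hi0, hi1⟩ := PySem.List.mem_pyRange_one.mp hi
    have hwin : i.toNat + patt2.length ≤ d.length := by omega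
    have hslice : PySem.List.slice d (some i) (some (i + (patt2.length : Int)))
        = (d.drop i.toNat).take patt2.length := by
      rw [PySem.List.slice_toNat d hi0 (by omega)]
      congr 1
      omega
    have hslen : ((d.drop i.toNat).take patt2.length).length = patt2.length := by
      simp only [List.length_take, List.length_drop]
      omega
    have hget : ∀ jn : Nat, jn < patt2.length →
        ((d.drop i.toNat).take patt2.length).getD jn 0 = d.getD (i.toNat + jn) 0 := by
      intro jn hjn
      rw [List.getD_eq_getElem _ _ (by omega : jn < ((d.drop i.toNat).take patt2.length).length),
        List.getD_eq_getElem _ _ (by omega : i.toNat + jn < d.length)]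
      rw [List.getElem_take, List.getElem_drop]
    have hanchor : PySem.List.pyGetD d (i + f) 0 = d.getD (i.toNat + fn) 0 := by
      rw [PySem.List.pyGetD_eq_getElem d 0 (by omega) (by omega),
        List.getD_eq_getElem _ _ (by omega : i.toNat + fn < d.length)]
      congr 1
      omega
    have hoff : PySem.List.pyGetD (PySem.List.slice d (some i) (some (i + (patt2.length : Int)))) f 0
        = d.getD (i.toNat + fn) 0 := by
      rw [hslice, PySem.List.pyGetD_eq_getElem _ 0 (by omega) (by rw [hslen]; omega)]
      rw [← List.getD_eq_getElem _ 0, hfeq]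
      simp only [Int.toNat_natCast]
      exact hget fn hfn
    rw [hoff, hslice, hanchor]
    -- both sides decide the same per-position property
    have hiff : ((List.range patt2.length).map
          (fun jj => if patt2.getD jj none = none then none
            else some (((d.drop i.toNat).take patt2.length).map
              (fun v => v - d.getD (i.toNat + fn) 0) |>.getD jj 0))
        = patt2)
        ↔ ((pvKeysOf patt2 0).all
            (fun p => PySem.List.pyGetD d (i + p.1) 0 - d.getD (i.toNat + fn) 0 == p.2) = true) := by
      have hmget : ∀ jn : Nat, jn < patt2.length →
          (((d.drop i.toNat).take patt2.length).map
            (fun v => v - d.getD (i.toNat + fn) 0)).getD jn 0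
          = d.getD (i.toNat + jn) 0 - d.getD (i.toNat + fn) 0 := by
        intro jn hjn
        rw [List.getD_eq_getElem _ _ (by rw [List.length_map, hslen]; exact hjn), List.getElem_map,
          ← List.getD_eq_getElem _ 0 (by omega : jn < ((d.drop i.toNat).take patt2.length).length),
          hget jn hjn]
      constructor
      · intro hEq
        rw [List.all_eq_true]
        rintro ⟨j, q⟩ hpmem
        obtain ⟨jn, hjn, hjeq, hjget⟩ := (pvMem_keysOf patt2 j q).1 hpmem
        have hjgetE : patt2[jn]'hjn = some q := by
          have := hjget; rwa [List.getElem?_eq_getElem hjn, Option.some.injEq] at this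
        have h1 := congrArg (fun l => l[jn]?) hEq
        simp only [List.getElem?_map, List.getElem?_range, hjn, Option.map_some] at h1
        rw [hjget] at h1
        rw [List.getD_eq_getElem _ _ hjn, hjgetE] at h1
        simp only [reduceCtorEq, if_false, hmget jn hjn, Option.some.injEq] at h1
        have hpy : PySem.List.pyGetD d (i + j) 0 = d.getD (i.toNat + jn) 0 := by
          rw [hjeq, PySem.List.pyGetD_eq_getElem d 0 (by omega) (by omega),
            List.getD_eq_getElem _ _ (by omega : i.toNat + jn < d.length)]
          congr 1
          omega
        simp only [hpy, beq_iff_eq]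
        exact h1
      · intro hAll
        rw [List.all_eq_true] at hAll
        apply List.ext_getElem (by simp)
        intro jn hjn1 hjn2
        simp only [List.getElem_map, List.getElem_range]
        have hjn : jn < patt2.length := hjn2
        rcases hp : patt2[jn]'hjn with _ | q
        · rw [List.getD_eq_getElem _ _ hjn, hp]
          simp
        · rw [List.getD_eq_getElem _ _ hjn, hp]
          simp only [reduceCtorEq, if_false]
          have hpmem : ((jn : Int), q) ∈ pvKeysOf patt2 0 := by
            rw [pvMem_keysOf]
            exact ⟨jn, hjn, rfl, by rw [List.getElem?_eq_getElem hjn, hp]⟩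
          have := hAll _ hpmem
          simp only [beq_iff_eq] at this
          have hpy : PySem.List.pyGetD d (i + (jn : Int)) 0 = d.getD (i.toNat + jn) 0 := by
            rw [PySem.List.pyGetD_eq_getElem d 0 (by omega) (by omega),
              List.getD_eq_getElem _ _ (by omega : i.toNat + jn < d.length)]
            congr 1
            omega
          rw [hpy] at this
          rw [hmget jn hjn, this]
    rw [show ((pvKeysOf patt2 0).all
            (fun p => PySem.List.pyGetD d (i + p.1) 0 - d.getD (i.toNat + fn) 0 == p.2))
        = decide ((pvKeysOf patt2 0).all
            (fun p => PySem.List.pyGetD d (i + p.1) 0 - d.getD (i.toNat + fn) 0 == p.2) = true)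
      from (Bool.decide_coe _).symm]
    exact decide_eq_decide.mpr hiff
  · -- appended elements agree on every index of the loop
    intro i hi
    beta_reduce
    obtain ⟨hi0, hi1⟩ := PySem.List.mem_pyRange_one.mp hi
    have hwin : i.toNat + patt2.length ≤ d.length := by omega
    have hslice : PySem.List.slice d (some i) (some (i + (patt2.length : Int)))
        = (d.drop i.toNat).take patt2.length := by
      rw [PySem.List.slice_toNat d hi0 (by omega)]
      congr 1
      omega
    have hslen : ((d.drop i.toNat).take patt2.length).length = patt2.length := by
      simp only [List.length_take, List.length_drop]
      omega
    have hoff : PySem.List.pyGetD (PySem.List.slice d (some i) (some (i + (patt2.length : Int)))) f 0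
        = PySem.List.pyGetD d (i + f) 0 := by
      rw [hslice, PySem.List.pyGetD_eq_getElem _ 0 (by omega) (by rw [hslen]; omega),
        PySem.List.pyGetD_eq_getElem d 0 (by omega) (by omega)]
      rw [List.getElem_take, List.getElem_drop]
      congr 1
      omega
    simp [hoff]

-- A's per-table result, reshaped to (addr, (name, display)), is B's per-table entry list
theorem pvL_map (s tbl name : String) (d : List Int) :
    ((pvA_search_pattern_table s tbl d).1 = none → pvB_tableEntries name s tbl d = []) ∧
    (∀ off, (pvA_search_pattern_table s tbl d).1 = some off →
      (pvA_search_pattern_table s tbl d).2.map (fun r => (r.2, (name, r.1 - off)))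
        = pvB_tableEntries name s tbl d) := by
  have hpatt : (s.toList.map (fun c => match PySem.List.index? tbl.toList c with
      | some k => some ((k : Int)) | none => none))
      = s.toList.map (fun c => (PySem.List.index? tbl.toList c).map (fun k => (k : Int))) := by
    refine List.map_congr_left (fun c _ => ?_)
    cases PySem.List.index? tbl.toList c <;> rfl
  have hkeysB : ((PySem.List.enumerate s.toList 0).filterMap
      (fun p => (PySem.List.index? tbl.toList p.2).map (fun k => (p.1, (k : Int)))))
      = pvKeysOf (s.toList.map (fun c => (PySem.List.index? tbl.toList c).map (fun k => (k : Int)))) 0 := by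
    rw [← pvKeys_eq_keysOf s.toList (fun c => (PySem.List.index? tbl.toList c).map (fun k => (k : Int))) 0]
    refine List.filterMap_congr (fun p _ => ?_)
    cases PySem.List.index? tbl.toList p.2 <;> rfl
  set h : Char → Option Int := fun c => (PySem.List.index? tbl.toList c).map (fun k => (k : Int)) with hdef
  set patt := s.toList.map h with hpattdef
  set K := pvKeysOf patt 0 with hK
  have hflt : patt.filterMap id = K.map (·.2) := (pvKeysOf_map_snd patt 0).symm
  simp only [pvA_search_pattern_table, pvB_tableEntries]
  rw [hpatt, hkeysB]
  rcases hKc : K with _ | ⟨k0, K'⟩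
  · -- no usable character: A's offset is None, B has no keys
    have hfe : patt.filterMap id = [] := by rw [hflt, hKc]; rfl
    constructor
    · intro _
      simp
    · intro off hoff
      rw [hfe] at hoff
      simp at hoff
  · -- at least one key
    have hfne : 0 < (patt.filterMap id).length := by rw [hflt, hKc]; simp
    have hhd : (patt.filterMap id).headD 0 = k0.2 := by
      rw [hflt, hKc]; rfl
    rw [if_pos hfne, hhd]
    refine ⟨fun hc => by simp at hc, fun off hoff => ?_⟩
    have hoffv : off = k0.2 := by simpa using hoff.symm
    subst hoffv
    simp only [Option.getD_some]
    have hp2flt : ((patt.map (Option.map (fun v => v - k0.2))).filterMap id).length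
        = K.length := by
      have := pvKeysOf_map_snd (patt.map (Option.map (fun v => v - k0.2))) 0
      rw [pvKeysOf_map] at this
      have hl := congrArg List.length this
      simpa using hl.symm
    by_cases hone : ((patt.map (Option.map (fun v => v - k0.2))).filterMap id).length ≤ 1
    · -- only one usable character: A searches the empty pattern, B bails out
      have hK1 : K.length ≤ 1 := by omega
      rw [if_pos hone]
      rw [if_pos (show (k0 :: K').length < 2 by rw [hKc] at hK1; simpa using hK1)]
      simp [pvA_search_pattern]
    · have hK2 : 2 ≤ K.length := by omega
      rw [if_neg hone]
      rw [if_neg (show ¬ ((k0 :: K').length < 2) by rw [hKc] at hp2flt; omega)]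
      have hrel : (k0 :: K').map (fun p => (p.1, p.2 - k0.2))
          = pvKeysOf (patt.map (Option.map (fun v => v - k0.2))) 0 := by
        rw [pvKeysOf_map, ← hK, hKc]
      have hhead2 : (pvKeysOf (patt.map (Option.map (fun v => v - k0.2))) 0).head?
          = some (k0.1, 0) := by
        rw [pvKeysOf_map, ← hK, hKc, List.head?_map]
        simp
      have hm : ((s.toList.length : Int)) = ((patt.map (Option.map (fun v => v - k0.2))).length : Int) := by
        simp [hpattdef]
      simp only [List.headD_cons, List.tail_cons]
      rw [hm]
      rw [pvL_core d (patt.map (Option.map (fun v => v - k0.2))) k0.1 k0.2 name hhead2]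
      -- both sides are now a filter of the same pyRange followed by the same map
      rw [pvFoldl_if_eq_filterMap, List.nil_append, pvStagedFilter]
      congr 1
      refine List.filter_congr (fun i _ => ?_)
      rw [← hrel, List.map_cons, List.all_cons, List.all_map,
        pvChain_eq_all d i k0.1 k0.2 k0 K' (by simp)]
      simp [Function.comp_def]

-- one table's contribution to A's grouping dict is a modify-fold over B's entry list
theorem pvL_table (s tbl name : String) (d : List Int)
    (results : PySem.Dict Int (List (String × Int))) :
    (match (pvA_search_pattern_table s tbl d).1 with
     | none => results
     | some off => (pvA_search_pattern_table s tbl d).2.foldl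
         (fun results r =>
           let results1 := if results.contains r.2 then results else results.insert r.2 []
           results1.insert r.2 (results1.getD r.2 [] ++ [(name, r.1 - off)])) results)
      = (pvB_tableEntries name s tbl d).foldl
          (fun dd e => dd.modify e.1 [] (· ++ [e.2])) results := by
  obtain ⟨hnone, hsome⟩ := pvL_map s tbl name d
  rcases hoff : (pvA_search_pattern_table s tbl d).1 with _ | off
  · rw [hnone hoff]
    rfl
  · rw [← hsome off hoff, List.foldl_map]
    refine PySem.List.foldl_congr_mem _ _ _ results (fun acc r _ => ?_)
    exact pvStep_eq_modify acc r.2 (name, r.1 - off)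

-- ===== VERDICT (by name: the statement is the Claim_ definition above) =====
theorem search_multiple_pattern_tables_spec : Claim_equal_search_multiple_pattern_tables := by
  intro search_str pattern_tables data _
  unfold Spec_search_multiple_pattern_tables
  simp only [search_multiple_pattern_tables, search_multiple_pattern_tables_alt]
  rw [PySem.List.foldl_congr_mem ((PySem.Dict.ofList pattern_tables).items) _
      (fun acc tp => (pvB_tableEntries tp.1 search_str tp.2 data).foldl
        (fun dd e => dd.modify e.1 [] (· ++ [e.2])) acc)
      PySem.Dict.empty
      (fun acc tp _ => pvL_table search_str tp.2 tp.1 data acc)]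
  have h1 := pvFoldl_foldl_flatMap
    (fun tp : String × String => pvB_tableEntries tp.1 search_str tp.2 data)
    (fun dd (e : Int × (String × Int)) => dd.modify e.1 [] (· ++ [e.2]))
    (PySem.Dict.ofList pattern_tables).items PySem.Dict.empty
  have h2 := PySem.List.foldl_append_eq_flatMap
    (fun tp : String × String => pvB_tableEntries tp.1 search_str tp.2 data)
    (PySem.Dict.ofList pattern_tables).items ([] : List (Int × (String × Int)))
  simp only [List.nil_append] at h1 h2
  rw [h1, ← h2, pvGroup_items]
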